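-- pv_equiv track=rewrite | github.com/pilotmain/aethos | app/services/runtime/runtime_operator_surface.py | sanitize_operator_log_line
-- ===== SOURCE A (Python) =====
-- def sanitize_operator_log_line(text: str) -> str:
--     """Strip legacy Nexa labels from operator-visible log lines."""
--     repl = (
--         ("nexa_llm_provider", "active_provider"),
--         ("[nexa.settings]", "[aethos.settings]"),
--         ("Nexa (", "AethOS ("),
--         ("=== Nexa config", "=== AethOS config"),
--         ("=== end Nexa config", "=== end AethOS config"),
--         ("Nexa:", "AethOS:"),
--     )
--     out = text
--     for old, new in repl:
--         out = out.replace(old, new)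
--     return out
-- ===== SOURCE B (Python) =====
-- _TABLE = (
--     ("nexa_llm_provider", "active_provider"),
--     ("[nexa.settings]", "[aethos.settings]"),
--     ("Nexa (", "AethOS ("),
--     ("=== Nexa config", "=== AethOS config"),
--     ("=== end Nexa config", "=== end AethOS config"),
--     ("Nexa:", "AethOS:"),
-- )
--
--
-- def sanitize_operator_log_line(text: str) -> str:
--     """Strip legacy Nexa labels from operator-visible log lines.
--
--     Single left-to-right pass with table dispatch instead of six sequential
--     full-string replace passes; equivalent because no replacement output can
--     form or extend a pattern and no two patterns can match at one position.
--     """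
--     out = []
--     i, n = 0, len(text)
--     while i < n:
--         for old, new in _TABLE:
--             if text.startswith(old, i):
--                 out.append(new)
--                 i += len(old)
--                 break
--         else:
--             out.append(text[i])
--             i += 1
--     return "".join(out)
-- ===== Notes on version B (the rewrite author's own statement) =====
-- stated objective: alternative
-- what changed: Replaced six sequential full-string replace passes (each rebuilding the whole string) with a single left-to-right scan that dispatches on a table of (old, new) pairs at each position; equality holds because no two patterns can match at one position and no replacement output can form or extend a pattern, which the Lean proof establishes.
import Mathlib
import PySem

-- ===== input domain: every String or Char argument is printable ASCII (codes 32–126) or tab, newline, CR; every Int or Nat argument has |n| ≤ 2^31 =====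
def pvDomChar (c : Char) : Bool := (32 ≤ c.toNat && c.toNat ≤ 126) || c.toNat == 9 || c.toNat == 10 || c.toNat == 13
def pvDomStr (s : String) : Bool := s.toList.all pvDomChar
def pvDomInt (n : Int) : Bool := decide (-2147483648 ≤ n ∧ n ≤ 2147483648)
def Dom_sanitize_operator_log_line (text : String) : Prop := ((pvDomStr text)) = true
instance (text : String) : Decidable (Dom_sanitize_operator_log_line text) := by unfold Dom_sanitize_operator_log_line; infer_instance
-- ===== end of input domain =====

-- B replaces A's six sequential full-string replace passes by ONE left-to-right scan with
-- first-match table dispatch (alternative decomposition; same observable result, proved below).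

-- ===== PORT A =====
-- A: out = text; for (old, new) in repl: out = out.replace(old, new)
def sanitize_operator_log_line (text : String) : String :=
  let repl : List (String × String) :=
    [("nexa_llm_provider", "active_provider"),
     ("[nexa.settings]", "[aethos.settings]"),
     ("Nexa (", "AethOS ("),
     ("=== Nexa config", "=== AethOS config"),
     ("=== end Nexa config", "=== end AethOS config"),
     ("Nexa:", "AethOS:")]
  repl.foldl (fun out pr => PySem.Str.replace out pr.1 pr.2) text

-- ===== PORT B =====
-- B's module-level table _TABLE (patterns/replacements as char lists)
def pvTable : List (List Char × List Char) :=
  [("nexa_llm_provider".toList, "active_provider".toList),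
   ("[nexa.settings]".toList, "[aethos.settings]".toList),
   ("Nexa (".toList, "AethOS (".toList),
   ("=== Nexa config".toList, "=== AethOS config".toList),
   ("=== end Nexa config".toList, "=== end AethOS config".toList),
   ("Nexa:".toList, "AethOS:".toList)]

-- B's while loop over position i, transcribed as recursion on the remaining suffix;
-- the inner for-with-break (first entry with text.startswith(old, i)) is List.find?.
def pvScanT (T : List (List Char × List Char)) : List Char → List Char
  | [] => []
  | c :: t =>
    match List.find? (fun pr => pr.1.isPrefixOf (c :: t)) T with
    | some pr => pr.2 ++ pvScanT T (t.drop (pr.1.length - 1))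
    | none => c :: pvScanT T t
termination_by l => l.length
decreasing_by
  all_goals simp only [List.length_drop, List.length_cons]
  all_goals omega

def sanitize_operator_log_line_alt (text : String) : String :=
  String.ofList (pvScanT pvTable text.toList)

-- ===== PRECONDITION & SPEC =====
def Spec_sanitize_operator_log_line (text : String) (out : String) : Prop := out = sanitize_operator_log_line_alt text
instance (text : String) (out : String) : Decidable (Spec_sanitize_operator_log_line text out) := by unfold Spec_sanitize_operator_log_line; infer_instance

-- ===== CLAIM (what is proved, stated in full; the proofs are below) =====
def Claim_equal_sanitize_operator_log_line : Prop := ∀ (text : String), Dom_sanitize_operator_log_line text → Spec_sanitize_operator_log_line text (sanitize_operator_log_line text)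

-- ===== LEMMAS AND PROOFS =====

-- Python's s.replace(old, new) for nonempty old, in direct recursive form.
def pvRepl (old new : List Char) : List Char → List Char
  | [] => []
  | c :: t =>
    if old.isPrefixOf (c :: t) then new ++ pvRepl old new (t.drop (old.length - 1))
    else c :: pvRepl old new t
termination_by l => l.length
decreasing_by
  all_goals simp only [List.length_drop, List.length_cons]
  all_goals omega

lemma pv_go_eq (old new : List Char) (h : old ≠ []) :
    ∀ (fuel : Nat) (l acc : List Char), l.length ≤ fuel →
      PySem.Chars.replace.go old new fuel l acc = acc.reverse ++ pvRepl old new l := by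
  intro fuel
  induction fuel with
  | zero =>
    intro l acc hl
    have hnil : l = [] := by cases l with
      | nil => rfl
      | cons a b => simp at hl
    subst hnil
    simp [PySem.Chars.replace.go, pvRepl]
  | succ n ih =>
    intro l acc hl
    cases l with
    | nil => simp [PySem.Chars.replace.go, pvRepl]
    | cons c t =>
      rw [PySem.Chars.replace.go]
      by_cases hp : old.isPrefixOf (c :: t)
      · rw [if_pos hp]
        obtain ⟨o, ot, rfl⟩ : ∃ o ot, old = o :: ot := by
          cases old with
          | nil => exact absurd rfl h
          | cons o ot => exact ⟨o, ot, rfl⟩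
        have hdrop : (c :: t).drop (o :: ot).length = t.drop ((o :: ot).length - 1) := by
          simp [List.length_cons]
        rw [hdrop, ih _ _ (by
          simp only [List.length_drop]
          simp only [List.length_cons] at hl
          omega)]
        rw [pvRepl, if_pos hp]
        simp
      · rw [if_neg hp]
        rw [ih _ _ (by simp only [List.length_cons] at hl; omega)]
        rw [pvRepl, if_neg hp]
        simp

lemma pv_replace_eq (s old new : List Char) (h : old ≠ []) :
    PySem.Chars.replace s old new = pvRepl old new s := by
  rw [PySem.Chars.replace, if_neg (by simpa [List.isEmpty_iff] using h)]
  simpa using pv_go_eq old new h s.length s [] le_rfl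

-- two prefixes of the same list are comparable: old <+: s ++ v forces old <+: s or s <+: old
lemma pv_prefix_cases {a s v : List Char} (h : a <+: s ++ v) : a <+: s ∨ s <+: a :=
  List.prefix_or_prefix_of_prefix h (List.prefix_append s v)

-- L1: if no nonempty suffix of u is prefix-comparable with old, replace passes u through
lemma pv_repl_pass (old new : List Char) :
    ∀ (u v : List Char),
      (∀ s, s <:+ u → s ≠ [] → ¬ old <+: s ∧ ¬ s <+: old) →
      pvRepl old new (u ++ v) = u ++ pvRepl old new v := by
  intro u
  induction u with
  | nil => simp
  | cons c u' ih =>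
    intro v h
    have hcu := h (c :: u') List.suffix_rfl (by simp)
    have hnp : ¬ old.isPrefixOf ((c :: u') ++ v) = true := by
      rw [List.isPrefixOf_iff_prefix]
      intro hx
      rcases pv_prefix_cases hx with h1 | h1
      · exact hcu.1 h1
      · exact hcu.2 h1
    rw [List.cons_append, pvRepl, if_neg (by simpa using hnp)]
    rw [ih v (fun s hs hne => h s (hs.trans (List.suffix_cons c u')) hne), List.cons_append]

-- L2: if no nonempty suffix of w is prefix-comparable with new, replace cannot create a
-- prefix w that was not already there
lemma pv_repl_no_create (old new : List Char) :
    ∀ (w : List Char),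
      (∀ v, v <:+ w → v ≠ [] → ¬ v <+: new ∧ ¬ new <+: v) →
      ∀ t, ¬ w <+: t → ¬ w <+: pvRepl old new t := by
  intro w
  induction w with
  | nil => intro _ t hw; exact absurd (List.nil_prefix) hw
  | cons d w' ih =>
    intro h t hwt hcon
    cases t with
    | nil =>
      rw [pvRepl] at hcon
      exact absurd (List.prefix_nil.mp hcon) (by simp)
    | cons c t' =>
      rw [pvRepl] at hcon
      by_cases hp : old.isPrefixOf (c :: t')
      · rw [if_pos hp] at hcon
        rcases pv_prefix_cases hcon with h1 | h1
        · exact (h (d :: w') List.suffix_rfl (by simp)).1 h1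
        · exact (h (d :: w') List.suffix_rfl (by simp)).2 h1
      · rw [if_neg hp] at hcon
        rw [List.cons_prefix_cons] at hcon
        have hne : ¬ w' <+: t' := by
          intro hx
          exact hwt (by rw [List.cons_prefix_cons]; exact ⟨hcon.1, hx⟩)
        exact ih (fun v hv hvne => h v (hv.trans (List.suffix_cons d w')) hvne) t' hne hcon.2

-- replace consumes its own pattern at the head
lemma pv_repl_head (old new X : List Char) (h : old ≠ []) :
    pvRepl old new (old ++ X) = new ++ pvRepl old new X := by
  obtain ⟨o, ot, rfl⟩ : ∃ o ot, old = o :: ot := by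
    cases old with
    | nil => exact absurd rfl h
    | cons o ot => exact ⟨o, ot, rfl⟩
  rw [List.cons_append, pvRepl,
    if_pos (by rw [List.isPrefixOf_iff_prefix, ← List.cons_append]; exact ⟨X, rfl⟩)]
  have : (ot ++ X).drop ((o :: ot).length - 1) = X := by
    simp [List.length_cons]
  rw [this]

-- A's chain of replaces as a fold over a table
def pvChain (T : List (List Char × List Char)) (l : List Char) : List Char :=
  T.foldl (fun acc pr => pvRepl pr.1 pr.2 acc) l

lemma pv_chain_nil : ∀ (T : List (List Char × List Char)), pvChain T [] = [] := by
  intro T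
  induction T with
  | nil => rfl
  | cons a T' ih => simpa [pvChain, pvRepl] using ih

lemma pv_chain_pass :
    ∀ (T : List (List Char × List Char)) (u v : List Char),
      (∀ qr ∈ T, ∀ s, s <:+ u → s ≠ [] → ¬ qr.1 <+: s ∧ ¬ s <+: qr.1) →
      pvChain T (u ++ v) = u ++ pvChain T v := by
  intro T
  induction T with
  | nil => intro u v _; rfl
  | cons a T' ih =>
    intro u v h
    show pvChain T' (pvRepl a.1 a.2 (u ++ v)) = u ++ pvChain T' (pvRepl a.1 a.2 v)
    rw [pv_repl_pass a.1 a.2 u v (h a (List.mem_cons_self))]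
    exact ih u _ (fun qr hq => h qr (List.mem_cons_of_mem a hq))

lemma pv_chain_cons :
    ∀ (T : List (List Char × List Char)) (c : Char) (t : List Char),
      (∀ qr ∈ T, ¬ qr.1 <+: c :: t) →
      (∀ qr ∈ T, ∀ ar ∈ T, ∀ v, v <:+ qr.1 → v ≠ [] → v ≠ qr.1 →
        ¬ v <+: ar.2 ∧ ¬ ar.2 <+: v) →
      pvChain T (c :: t) = c :: pvChain T t := by
  intro T
  induction T with
  | nil => intro c t _ _; rfl
  | cons a T' ih =>
    intro c t hm hx
    have h1 : pvRepl a.1 a.2 (c :: t) = c :: pvRepl a.1 a.2 t := by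
      rw [pvRepl, if_neg (by
        rw [List.isPrefixOf_iff_prefix]
        exact hm a List.mem_cons_self)]
    show pvChain T' (pvRepl a.1 a.2 (c :: t)) = c :: pvChain T' (pvRepl a.1 a.2 t)
    rw [h1]
    refine ih c (pvRepl a.1 a.2 t) ?_ ?_
    · intro q hq hcon
      cases hq1 : q.1 with
      | nil => exact hm q (List.mem_cons_of_mem a hq) (hq1 ▸ List.nil_prefix)
      | cons d q' =>
        rw [hq1, List.cons_prefix_cons] at hcon
        have hnq : ¬ q' <+: t := by
          intro hy
          exact hm q (List.mem_cons_of_mem a hq)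
            (by rw [hq1, List.cons_prefix_cons]; exact ⟨hcon.1, hy⟩)
        refine pv_repl_no_create a.1 a.2 q' ?_ t hnq hcon.2
        intro v hv hvne
        refine hx q (List.mem_cons_of_mem a hq) a List.mem_cons_self v
          (by rw [hq1]; exact hv.trans (List.suffix_cons d q')) hvne ?_
        rw [hq1]
        intro heq
        have hlen := hv.length_le
        rw [heq] at hlen
        simp at hlen
    · intro qr hq ar ha
      exact hx qr (List.mem_cons_of_mem a hq) ar (List.mem_cons_of_mem a ha)

lemma pv_chain_split (T1 T2 : List (List Char × List Char)) (pr : List Char × List Char)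
    (x : List Char) :
    pvChain (T1 ++ pr :: T2) x = pvChain T2 (pvRepl pr.1 pr.2 (pvChain T1 x)) := by
  simp [pvChain, List.foldl_append]

-- the main induction: the six-pass chain equals the single scan, for any table whose
-- patterns and replacements are pairwise non-interacting
lemma pv_chain_eq_scan_aux (T : List (List Char × List Char))
    (hne : ∀ pr ∈ T, pr.1 ≠ [])
    (hpp : ∀ pr ∈ T, ∀ qr ∈ T, pr.1 ≠ qr.1 → ¬ pr.1 <+: qr.1)
    (hps : ∀ pr ∈ T, ∀ qr ∈ T, ∀ s, s <:+ pr.1 → s ≠ [] → s ≠ pr.1 →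
      ¬ qr.1 <+: s ∧ ¬ s <+: qr.1)
    (hrs : ∀ pr ∈ T, ∀ qr ∈ T, ∀ s, s <:+ pr.2 → s ≠ [] →
      ¬ qr.1 <+: s ∧ ¬ s <+: qr.1)
    (hpr : ∀ pr ∈ T, ∀ qr ∈ T, ∀ v, v <:+ pr.1 → v ≠ [] → v ≠ pr.1 →
      ¬ v <+: qr.2 ∧ ¬ qr.2 <+: v) :
    ∀ (n : Nat) (l : List Char), l.length ≤ n → pvChain T l = pvScanT T l := by
  intro n
  induction n with
  | zero =>
    intro l hl
    have hnil : l = [] := by cases l with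
      | nil => rfl
      | cons a b => simp at hl
    subst hnil
    rw [pv_chain_nil, pvScanT]
  | succ n ih =>
    intro l hl
    cases hf : List.find? (fun pr => pr.1.isPrefixOf l) T with
    | none =>
      have hnm : ∀ qr ∈ T, ¬ qr.1 <+: l := by
        intro qr hq
        have := List.find?_eq_none.mp hf qr hq
        simpa [List.isPrefixOf_iff_prefix] using this
      cases l with
      | nil => rw [pv_chain_nil, pvScanT]
      | cons c t =>
        rw [pv_chain_cons T c t hnm (fun qr hq ar ha v hv hvne hvq =>
          hpr qr hq ar ha v hv hvne hvq)]
        rw [pvScanT, hf]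
        rw [ih t (by simp only [List.length_cons] at hl; omega)]
    | some pr =>
      obtain ⟨hppr, T1, T2, hT, hT1⟩ := List.find?_eq_some_iff_append.mp hf
      have hpre : pr.1 <+: l := List.isPrefixOf_iff_prefix.mp hppr
      have hmem : pr ∈ T := by
        rw [hT]; exact List.mem_append_right _ List.mem_cons_self
      have hne' : pr.1 ≠ [] := hne pr hmem
      obtain ⟨rest, rfl⟩ := hpre
      have hmemT1 : ∀ qr ∈ T1, qr ∈ T := by
        intro q hq; rw [hT]; exact List.mem_append_left _ hq
      have hqne : ∀ qr ∈ T1, qr.1 ≠ pr.1 := by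
        intro q hq heq
        have := hT1 q hq
        rw [Bool.not_eq_eq_eq_not, Bool.not_true, ← Bool.not_eq_true,
          List.isPrefixOf_iff_prefix] at this
        exact this (heq ▸ List.prefix_append pr.1 rest)
      have hpass1 : pvChain T1 (pr.1 ++ rest) = pr.1 ++ pvChain T1 rest := by
        refine pv_chain_pass T1 pr.1 rest ?_
        intro q hq s hs hsne
        by_cases hsp : s = pr.1
        · subst hsp
          exact ⟨hpp q (hmemT1 q hq) pr hmem (hqne q hq),
                 hpp pr hmem q (hmemT1 q hq) (fun hy => hqne q hq hy.symm)⟩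
        · exact hps pr hmem q (hmemT1 q hq) s hs hsne hsp
      have hmemT2 : ∀ qr ∈ T2, qr ∈ T := by
        intro q hq; rw [hT]; exact List.mem_append_right _ (List.mem_cons_of_mem pr hq)
      have hpass2 : ∀ Y, pvChain T2 (pr.2 ++ Y) = pr.2 ++ pvChain T2 Y := by
        intro Y
        refine pv_chain_pass T2 pr.2 Y ?_
        intro q hq s hs hsne
        exact hrs pr hmem q (hmemT2 q hq) s hs hsne
      have hchain : pvChain T (pr.1 ++ rest) = pr.2 ++ pvChain T rest := by
        rw [hT, pv_chain_split, pv_chain_split, hpass1,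
          pv_repl_head pr.1 pr.2 _ hne', hpass2]
      rw [hchain]
      obtain ⟨p0, pt, hpr1⟩ : ∃ p0 pt, pr.1 = p0 :: pt := by
        cases hp : pr.1 with
        | nil => exact absurd hp hne'
        | cons p0 pt => exact ⟨p0, pt, rfl⟩
      rw [hpr1, List.cons_append] at hf
      rw [hpr1, List.cons_append, pvScanT, hf]
      have hdrop : List.drop ((p0 :: pt).length - 1) (pt ++ rest) = rest := by
        simp only [List.length_cons, Nat.add_sub_cancel]
        exact List.drop_left
      show pr.2 ++ pvChain T rest = pr.2 ++ pvScanT T (List.drop (pr.1.length - 1) (pt ++ rest))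
      rw [hpr1, hdrop]
      have hrest : rest.length ≤ n := by
        rw [hpr1] at hl
        simp only [List.cons_append, List.length_cons, List.length_append] at hl
        omega
      rw [ih rest hrest]

-- the concrete table is non-interacting (checked by the kernel)
lemma pv_chain_eq_scan : ∀ (l : List Char), pvChain pvTable l = pvScanT pvTable l := by
  have h1 : ∀ pr ∈ pvTable, pr.1 ≠ [] := by decide
  have h2 : ∀ pr ∈ pvTable, ∀ qr ∈ pvTable, pr.1 ≠ qr.1 → ¬ pr.1 <+: qr.1 := by decide
  have h3 : ∀ pr ∈ pvTable, ∀ qr ∈ pvTable, ∀ s ∈ pr.1.tails, s ≠ [] → s ≠ pr.1 →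
      ¬ qr.1 <+: s ∧ ¬ s <+: qr.1 := by decide
  have h4 : ∀ pr ∈ pvTable, ∀ qr ∈ pvTable, ∀ s ∈ pr.2.tails, s ≠ [] →
      ¬ qr.1 <+: s ∧ ¬ s <+: qr.1 := by decide
  have h5 : ∀ pr ∈ pvTable, ∀ qr ∈ pvTable, ∀ v ∈ pr.1.tails, v ≠ [] → v ≠ pr.1 →
      ¬ v <+: qr.2 ∧ ¬ qr.2 <+: v := by decide
  intro l
  exact pv_chain_eq_scan_aux pvTable h1 h2
    (fun pr hp qr hq s hs => h3 pr hp qr hq s ((List.mem_tails s pr.1).mpr hs))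
    (fun pr hp qr hq s hs => h4 pr hp qr hq s ((List.mem_tails s pr.2).mpr hs))
    (fun pr hp qr hq v hv => h5 pr hp qr hq v ((List.mem_tails v pr.1).mpr hv))
    l.length l le_rfl

lemma pv_A_eq (text : String) :
    sanitize_operator_log_line text = String.ofList (pvChain pvTable text.toList) := by
  simp only [sanitize_operator_log_line, pvChain, pvTable, List.foldl_cons, List.foldl_nil,
    PySem.Str.replace, String.toList_ofList]
  rw [pv_replace_eq _ _ _ (by decide), pv_replace_eq _ _ _ (by decide),
    pv_replace_eq _ _ _ (by decide), pv_replace_eq _ _ _ (by decide),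
    pv_replace_eq _ _ _ (by decide), pv_replace_eq _ _ _ (by decide)]

-- ===== VERDICT (by name: the statement is the Claim_ definition above) =====
theorem sanitize_operator_log_line_spec : Claim_equal_sanitize_operator_log_line := by
  unfold Claim_equal_sanitize_operator_log_line Spec_sanitize_operator_log_line
  intro text _
  rw [pv_A_eq, pv_chain_eq_scan]
  rfl
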